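/- GENERATED by tools/mkclosed.py from the statements of the heap toy (Toyh/Spec/Units/*.lean) — do not edit; re-run it when a statement changes.
   THE BOTTOM-UP COMPOSITION: every unit's contract with no hypothesis about a callee left, from the unit theorems, in a
   topological order of the hypotheses (4 units, 5 functions). -/
import Toyh.ClosedSpec
import ProgX.Base.Spec.Proved.asan_register_globals_generic
import Toyh.Spec.Proved.clamp_length
import Toyh.Spec.Proved.prog_main
import Toyh.Spec.Proved.sub_I_65535_1
import Toyh.Spec.Proved.run_ctors
namespace Toyh.Closed
open X86 X86.User Asan

/-- **THE COMPOSITION**: one line per unit, callees before callers. -/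
theorem closed (Lay : Layout) (hLay : Lay.hi = 0x1000000) (μ : Microarch) (hμ : UserX.MicroOK μ) (u₀ : State)
    (hcode : AllCode Lay u₀) (hgiven : ProgX.Base.Closed.Contracts Lay μ u₀) : Contracts Lay μ u₀ := by
  have h_asan_register_globals := ProgX.Base.Spec.Proved.asan_register_globals_generic_ok Lay hLay μ hμ u₀ hcode.asan_register_globals Toyh.Spec.rt (by decide) (by decide)
  have h_clamp_length := Toyh.Spec.Proved.clamp_length_ok Lay hLay μ hμ u₀ hcode.clamp_length
  have h_prog_main := Toyh.Spec.Proved.prog_main_ok Lay hLay μ hμ u₀ hcode.prog_main h_clamp_length hgiven.malloc hgiven.memcpy hgiven.free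
  have h_sub_I_65535_1 := Toyh.Spec.Proved.sub_I_65535_1_ok Lay hLay μ hμ u₀ hcode.sub_I_65535_1 h_asan_register_globals
  have h_run_ctors := Toyh.Spec.Proved.run_ctors_ok Lay hLay μ hμ u₀ hcode.run_ctors h_sub_I_65535_1
  exact {
    clamp_length := h_clamp_length,
    prog_main := h_prog_main,
    sub_I_65535_1 := h_sub_I_65535_1,
    run_ctors := h_run_ctors
  }

end Toyh.Closed
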